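-- pv_equiv track=rewrite | github.com/CalCharles/chapter_guesser | chapter_guesser.py | split_passage
-- ===== SOURCE A (Python) =====
-- def split_passage(p, chapter):
--     verses = list()
--     numbers = "1234567890"
--     innum = False
--     first = True
--     current = ""
--     for c in p:
--         if c in numbers:
--             if not innum:
--                 verses.append(current + "---" + str(chapter))
--                 current = ""
--             innum = True
--         else:
--             innum = False
--         current += c
--     verses.pop(0)
--     return verses
-- ===== SOURCE B (Python) =====
-- import re
--
-- def split_passage(p, chapter):
--     # One regex pass: each match starts at a digit run and extends through the
--     # following non-digits; drop the last chunk (A never flushes its final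
--     # `current`).  Returns [] when p has no digit (A raises IndexError there).
--     segs = re.findall(r'[0-9]+[^0-9]*', p)
--     return [s + "---" + str(chapter) for s in segs[:-1]]
-- ===== Notes on version B (the rewrite author's own statement) =====
-- stated objective: idiomatic
-- what changed: Replaces the character-by-character state machine (innum flag, accumulated current, trailing pop(0)) by a single regex findall of digit-run-led segments followed by a slice-and-map comprehension.
import Mathlib
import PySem

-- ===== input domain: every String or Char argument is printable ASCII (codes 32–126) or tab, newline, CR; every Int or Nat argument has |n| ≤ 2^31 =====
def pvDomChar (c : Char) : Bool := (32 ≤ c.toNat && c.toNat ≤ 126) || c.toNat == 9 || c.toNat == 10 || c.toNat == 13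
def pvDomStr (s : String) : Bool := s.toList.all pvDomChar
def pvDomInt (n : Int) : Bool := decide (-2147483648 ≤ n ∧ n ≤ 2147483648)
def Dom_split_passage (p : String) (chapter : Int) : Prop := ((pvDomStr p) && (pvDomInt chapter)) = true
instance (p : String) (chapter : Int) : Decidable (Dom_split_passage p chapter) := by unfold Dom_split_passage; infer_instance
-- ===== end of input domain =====

-- B replaces A's character state machine by one regex-findall pass over digit-led segments (idiomatic; same cost).
-- ===== PORT A =====
-- A's loop, step for step: Python str modelled as List Char (PySem.Chars convention);
-- state = (verses, innum, current); `c in numbers` = membership in "1234567890".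
def pvLoopA (chapter : Int) : List Char → List String → Bool → List Char → List String
  | [], verses, _, _ => verses
  | c :: t, verses, innum, current =>
    if "1234567890".toList.contains c then
      if !innum then
        pvLoopA chapter t (verses ++ [String.mk current ++ "---" ++ PySem.Int.toStr chapter]) true ([] ++ [c])
      else
        pvLoopA chapter t verses true (current ++ [c])
    else
      pvLoopA chapter t verses false (current ++ [c])

-- verses.pop(0) raises IndexError on [] (excluded by Pre_); on a nonempty list it removes the head.
def split_passage (p : String) (chapter : Int) : List String :=
  (pvLoopA chapter p.toList [] false []).drop 1

-- ===== PORT B =====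
-- re.findall(r'[0-9]+[^0-9]*', p): scan to a digit, take the digit run plus following non-digits, repeat.
def pvFindall : List Char → List String
  | [] => []
  | c :: t =>
    if PySem.Chars.isdigit c then
      String.mk ((c :: t.takeWhile PySem.Chars.isdigit)
          ++ (t.dropWhile PySem.Chars.isdigit).takeWhile (fun x => !PySem.Chars.isdigit x))
        :: pvFindall ((t.dropWhile PySem.Chars.isdigit).dropWhile (fun x => !PySem.Chars.isdigit x))
    else
      pvFindall t
termination_by l => l.length
decreasing_by
  · simp only [List.length_cons]
    have h1 := List.length_dropWhile_le (fun x => !PySem.Chars.isdigit x) (t.dropWhile PySem.Chars.isdigit)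
    have h2 := List.length_dropWhile_le PySem.Chars.isdigit t
    omega
  · simp

def split_passage_alt (p : String) (chapter : Int) : List String :=
  ((pvFindall p.toList).dropLast).map (fun s => s ++ "---" ++ PySem.Int.toStr chapter)

-- ===== PRECONDITION & SPEC =====
-- Pre_ excludes exactly the inputs with no ASCII digit, where A's verses.pop(0) raises IndexError.
def Pre_split_passage (p : String) (chapter : Int) : Prop :=
  p.toList.any PySem.Chars.isdigit = true
instance (p : String) (chapter : Int) : Decidable (Pre_split_passage p chapter) := by
  unfold Pre_split_passage; infer_instance
def pvWitness_split_passage : String × Int := ("x1a2b3", 7)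

def Spec_split_passage (p : String) (chapter : Int) (out : List String) : Prop := out = split_passage_alt p chapter
instance (p : String) (chapter : Int) (out : List String) : Decidable (Spec_split_passage p chapter out) := by unfold Spec_split_passage; infer_instance

-- ===== CLAIM (what is proved, stated in full; the proofs are below) =====
def Claim_equal_split_passage : Prop := ∀ (p : String) (chapter : Int), Dom_split_passage p chapter → Pre_split_passage p chapter → Spec_split_passage p chapter (split_passage p chapter)

-- ===== LEMMAS AND PROOFS =====

-- A's digit test equals B's [0-9] test.
theorem pv_contains_eq_isdigit (c : Char) :
    ("1234567890".toList.contains c) = PySem.Chars.isdigit c := by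
  simp [PySem.Chars.isdigit, Char.le_def, Char.ext_iff, UInt32.le_iff_toNat_le, UInt32.ext_iff]
  rw [Bool.eq_iff_iff]
  simp only [Bool.or_eq_true, Bool.and_eq_true, decide_eq_true_eq]
  omega

-- accumulated verses factor out in front
theorem pvLoopA_append (ch : Int) (l : List Char) : ∀ (vs : List String) (innum : Bool) (cur : List Char),
    pvLoopA ch l vs innum cur = vs ++ pvLoopA ch l [] innum cur := by
  induction l with
  | nil => intro vs innum cur; simp [pvLoopA]
  | cons c t ih =>
    intro vs innum cur
    simp only [pvLoopA]
    split_ifs with h1 h2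
    · rw [ih, ih ([] ++ [String.mk cur ++ "---" ++ PySem.Int.toStr ch])]
      simp
    · rw [ih]
    · rw [ih]

-- the invariant: A's loop from innum=true / innum=false states, described by pvFindall segments
theorem pv_key (ch : Int) : ∀ (n : Nat) (t : List Char), t.length ≤ n → ∀ (cur : List Char),
    (pvLoopA ch t [] true cur =
      ((String.mk (cur ++ t.takeWhile PySem.Chars.isdigit
            ++ (t.dropWhile PySem.Chars.isdigit).takeWhile (fun x => !PySem.Chars.isdigit x))
        :: pvFindall ((t.dropWhile PySem.Chars.isdigit).dropWhile (fun x => !PySem.Chars.isdigit x))).dropLast).map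
          (fun s => s ++ "---" ++ PySem.Int.toStr ch))
    ∧ (pvLoopA ch t [] false cur =
      ((String.mk (cur ++ t.takeWhile (fun x => !PySem.Chars.isdigit x))
        :: pvFindall (t.dropWhile (fun x => !PySem.Chars.isdigit x))).dropLast).map
          (fun s => s ++ "---" ++ PySem.Int.toStr ch)) := by
  intro n
  induction n with
  | zero =>
    intro t ht cur
    have : t = [] := List.eq_nil_of_length_eq_zero (Nat.le_zero.mp ht)
    subst this
    simp [pvLoopA, pvFindall]
  | succ n ih =>
    intro t ht cur
    cases t with
    | nil => simp [pvLoopA, pvFindall]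
    | cons c t' =>
      have ht' : t'.length ≤ n := by simp only [List.length_cons] at ht; omega
      by_cases hd : PySem.Chars.isdigit c = true
      · have hc : ("1234567890".toList.contains c) = true := by
          rw [pv_contains_eq_isdigit]; exact hd
        constructor
        · -- innum = true: keep accumulating the digit
          simp only [pvLoopA, hc, if_pos, Bool.not_true, Bool.false_eq_true, if_false]
          rw [(ih t' ht' (cur ++ [c])).1]
          simp [hd]
        · -- innum = false: flush cur, start a new segment at c
          simp only [pvLoopA, hc, if_pos, Bool.not_false, if_true]
          rw [pvLoopA_append, (ih t' ht' ([] ++ [c])).1]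
          have hfind : pvFindall (c :: t') =
              String.mk ((c :: t'.takeWhile PySem.Chars.isdigit)
                ++ (t'.dropWhile PySem.Chars.isdigit).takeWhile (fun x => !PySem.Chars.isdigit x))
              :: pvFindall ((t'.dropWhile PySem.Chars.isdigit).dropWhile (fun x => !PySem.Chars.isdigit x)) := by
            rw [pvFindall]; simp [hd]
          simp [hd, hfind]
      · have hc : ("1234567890".toList.contains c) = false := by
          rw [pv_contains_eq_isdigit]; simpa using hd
        constructor
        · -- innum = true, non-digit: digit run ends, keep taking non-digits
          simp only [pvLoopA, hc, Bool.false_eq_true, if_false]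
          rw [(ih t' ht' (cur ++ [c])).2]
          simp [hd]
        · -- innum = false, non-digit
          simp only [pvLoopA, hc, Bool.false_eq_true, if_false]
          rw [(ih t' ht' (cur ++ [c])).2]
          simp [hd]

-- skipping the non-digit prefix does not change findall
theorem pvFindall_dropWhile (l : List Char) :
    pvFindall l = pvFindall (l.dropWhile (fun x => !PySem.Chars.isdigit x)) := by
  induction l with
  | nil => simp
  | cons c t ih =>
    by_cases hd : PySem.Chars.isdigit c = true
    · simp [List.dropWhile_cons, hd]
    · rw [show pvFindall (c :: t) = pvFindall t from by rw [pvFindall]; simp [hd]]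
      rw [List.dropWhile_cons]
      simp [hd, ih]

theorem pv_dropWhile_head_digit : ∀ (l : List Char) (c : Char) (t : List Char),
    l.dropWhile (fun x => !PySem.Chars.isdigit x) = c :: t → PySem.Chars.isdigit c = true := by
  intro l
  induction l with
  | nil => intro c t h; simp at h
  | cons a l' ih =>
    intro c t h
    rw [List.dropWhile_cons] at h
    by_cases hd : PySem.Chars.isdigit a = true
    · simp [hd] at h
      rw [← h.1]; exact hd
    · simp [hd] at h
      exact ih c t h

theorem pvFindall_ne_nil (c : Char) (t : List Char) (hd : PySem.Chars.isdigit c = true) :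
    pvFindall (c :: t) ≠ [] := by
  rw [pvFindall]; simp [hd]

theorem split_passage_spec : Claim_equal_split_passage := by
  intro p ch _ hpre
  unfold Spec_split_passage split_passage split_passage_alt
  rw [(pv_key ch p.toList.length p.toList le_rfl []).2]
  rw [pvFindall_dropWhile p.toList]
  -- the dropWhile remainder is nonempty and starts with a digit
  have hne : p.toList.dropWhile (fun x => !PySem.Chars.isdigit x) ≠ [] := by
    intro h
    rw [List.dropWhile_eq_nil_iff] at h
    unfold Pre_split_passage at hpre
    rw [List.any_eq_true] at hpre
    obtain ⟨c, hc, hcd⟩ := hpre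
    have := h c hc
    simp [hcd] at this
  obtain ⟨c, t, hct⟩ := List.exists_cons_of_ne_nil hne
  have hcd : PySem.Chars.isdigit c = true := pv_dropWhile_head_digit p.toList c t hct
  rw [hct]
  obtain ⟨s, rest, hsr⟩ := List.exists_cons_of_ne_nil (pvFindall_ne_nil c t hcd)
  rw [hsr]
  simp [List.map_dropLast]
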